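-- pv_equiv track=rewrite | github.com/j0ma/flores | scripts/stitch-segmentations-together.py | convert_lmvr_to_bpe_notation
-- ===== SOURCE A (Python) =====
-- LMVR_SEP = "+"
--
-- def convert_lmvr_to_bpe_notation(sentences, sep="@@"):
--     def is_lmvr_suffix(s):
--         return s.startswith(LMVR_SEP) and len(s) > 1
--
--     sentences_bpe = []
--
--     # converts from the lmvr format to bpe / subword-nmt
--     # format. for instance: amicab +ly ===> amicab@@ ly
--
--     for sent in sentences:
--         tokens_lmvr = sent.split(" ")
--         tokens_bpe = []
--
--         cur_nxt_pairs = zip(tokens_lmvr, tokens_lmvr[1:])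
--
--         for cur, nxt in cur_nxt_pairs:
--
--             if is_lmvr_suffix(cur):
--                 cur = cur[1:]
--
--             if is_lmvr_suffix(nxt):
--                 cur = "{}{}".format(cur, sep)
--             tokens_bpe.append(cur)
--
--         final = tokens_lmvr[-1]
--
--         if is_lmvr_suffix(final):
--             final = final[1:]
--         tokens_bpe.append(final)
--
--         sent_bpe = " ".join(tokens_bpe)
--         sentences_bpe.append(sent_bpe)
--
--     return sentences_bpe
-- ===== SOURCE B (Python) =====
-- # B: single character-level scan per sentence instead of split/zip/join over token pairs.
-- # A space followed by '+' followed by a non-space marks an LMVR suffix boundary: rewrite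
-- # " +x" -> sep + " x" in place; a sentence-initial "+x" just loses its '+'.
-- def convert_lmvr_to_bpe_notation(sentences, sep="@@"):
--     def fix(sent):
--         n = len(sent)
--         i = 1 if (n >= 2 and sent[0] == "+" and sent[1] != " ") else 0
--         out = []
--         while i < n:
--             if (sent[i] == " " and i + 2 < n
--                     and sent[i + 1] == "+" and sent[i + 2] != " "):
--                 out.append(sep)
--                 out.append(" ")
--                 i += 2
--             else:
--                 out.append(sent[i])
--                 i += 1
--         return "".join(out)
--
--     return [fix(sent) for sent in sentences]
-- ===== Notes on version B (the rewrite author's own statement) =====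
-- stated objective: alternative
-- what changed: Replaces A's split-into-tokens / zip-with-next / rebuild-and-join pipeline by a single character-level scan per sentence that rewrites ' +x' to sep+' x' in place (with a separate check for a sentence-initial '+').
import Mathlib
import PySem

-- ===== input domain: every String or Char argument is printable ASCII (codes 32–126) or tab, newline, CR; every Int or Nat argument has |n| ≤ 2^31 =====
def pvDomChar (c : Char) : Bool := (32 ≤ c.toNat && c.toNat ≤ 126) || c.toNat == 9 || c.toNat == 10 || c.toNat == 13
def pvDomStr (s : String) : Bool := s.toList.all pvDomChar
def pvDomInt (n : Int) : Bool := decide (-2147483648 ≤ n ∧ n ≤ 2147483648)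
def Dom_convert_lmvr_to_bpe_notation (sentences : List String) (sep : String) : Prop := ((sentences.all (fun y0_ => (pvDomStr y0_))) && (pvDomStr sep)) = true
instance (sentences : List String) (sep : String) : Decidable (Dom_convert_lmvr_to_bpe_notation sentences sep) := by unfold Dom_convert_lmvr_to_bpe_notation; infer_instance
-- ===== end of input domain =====

-- B replaces A's split/zip-with-next/join token pipeline by one character-level scan per
-- sentence (objective: alternative, same asymptotic cost).  Both programs are total.

-- ===== PORT A =====
-- A works per sentence on " "-split tokens; ported at the List Char level
-- (PySem string primitives are defined over List Char).

-- is_lmvr_suffix: s.startswith("+") and len(s) > 1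
def pvIsSuffix (t : List Char) : Bool :=
  PySem.Chars.startswith t ['+'] && decide (1 < t.length)

-- body of A's per-sentence loop
def pvSentA (sepL : List Char) (sentL : List Char) : List Char :=
  let tokens_lmvr := PySem.Chars.splitOn sentL [' ']          -- sent.split(" ")
  let cur_nxt_pairs := tokens_lmvr.zip tokens_lmvr.tail       -- zip(toks, toks[1:])
  let tokens_bpe := cur_nxt_pairs.foldl (fun acc cn =>
      let cur := if pvIsSuffix cn.1 then PySem.Chars.slice cn.1 (some 1) none else cn.1
      let cur := if pvIsSuffix cn.2 then cur ++ sepL else cur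
      acc ++ [cur]) []
  -- tokens_lmvr[-1]: split never returns an empty list, so the IndexError is unreachable
  let final := (PySem.List.pyGet? tokens_lmvr (-1)).getD []
  let final := if pvIsSuffix final then PySem.Chars.slice final (some 1) none else final
  PySem.Chars.join [' '] (tokens_bpe ++ [final])              -- " ".join(...)

def convert_lmvr_to_bpe_notation (sentences : List String) (sep : String) : List String :=
  sentences.map (fun sent => String.ofList (pvSentA sep.toList sent.toList))

-- ===== PORT B =====
-- B's while loop: copy characters; on " +c" with c ≠ ' ' emit sep ++ " " and skip two.
def pvScanB (sepL : List Char) : List Char → List Char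
  | [] => []
  | [c] => [c]                            -- fewer than 3 chars left: plain copy
  | [c, d1] => [c, d1]
  | c :: d1 :: d2 :: rest' =>
      if c = ' ' ∧ d1 = '+' ∧ d2 ≠ ' ' then sepL ++ ' ' :: pvScanB sepL (d2 :: rest')
      else c :: pvScanB sepL (d1 :: d2 :: rest')

-- B's per-sentence fix: start at index 1 when the sentence begins "+c" with c ≠ ' '
def pvSentB (sepL : List Char) (sentL : List Char) : List Char :=
  match sentL with
  | c0 :: c1 :: rest =>
      if c0 = '+' ∧ c1 ≠ ' ' then pvScanB sepL (c1 :: rest)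
      else pvScanB sepL (c0 :: c1 :: rest)
  | l => pvScanB sepL l

def convert_lmvr_to_bpe_notation_alt (sentences : List String) (sep : String) : List String :=
  sentences.map (fun sent => String.ofList (pvSentB sep.toList sent.toList))

-- ===== PRECONDITION & SPEC =====
def Spec_convert_lmvr_to_bpe_notation (sentences : List String) (sep : String) (out : List String) : Prop := out = convert_lmvr_to_bpe_notation_alt sentences sep
instance (sentences : List String) (sep : String) (out : List String) : Decidable (Spec_convert_lmvr_to_bpe_notation sentences sep out) := by unfold Spec_convert_lmvr_to_bpe_notation; infer_instance

-- ===== CLAIM (what is proved, stated in full; the proofs are below) =====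
def Claim_equal_convert_lmvr_to_bpe_notation : Prop := ∀ (sentences : List String) (sep : String), Dom_convert_lmvr_to_bpe_notation sentences sep → Spec_convert_lmvr_to_bpe_notation sentences sep (convert_lmvr_to_bpe_notation sentences sep)

-- ===== LEMMAS AND PROOFS =====

-- a simple structural model of s.split(" ")
def pvSp : List Char → List (List Char)
  | [] => [[]]
  | c :: cs =>
      if c = ' ' then [] :: pvSp cs
      else match pvSp cs with
        | t :: ts => (c :: t) :: ts
        | [] => [[c]]

theorem pvSp_ne_nil (cs : List Char) : pvSp cs ≠ [] := by
  cases cs with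
  | nil => simp [pvSp]
  | cons c cs =>
    simp only [pvSp]
    split
    · simp
    · split <;> simp

theorem pvSp_no_space (cs : List Char) : ∀ t ∈ pvSp cs, ∀ c ∈ t, c ≠ ' ' := by
  induction cs with
  | nil => simp [pvSp]
  | cons c cs ih =>
    simp only [pvSp]
    split
    · intro t ht
      rcases List.mem_cons.mp ht with h | h
      · simp [h]
      · exact ih t h
    · rename_i hc
      rcases hspl : pvSp cs with _ | ⟨t0, ts⟩
      · exact absurd hspl (pvSp_ne_nil cs)
      · intro t ht
        rcases List.mem_cons.mp ht with h | h
        · subst h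
          intro d hd
          rcases List.mem_cons.mp hd with h | h
          · subst h; exact hc
          · exact ih t0 (by rw [hspl]; exact List.mem_cons_self ..) d h
        · exact fun d hd => ih t (by rw [hspl]; exact List.mem_cons_of_mem _ h) d hd

-- splitOn with separator [' '] computes pvSp
theorem pvGo_spec (fuel : Nat) (l cur : List Char) (acc : List (List Char))
    (h : l.length < fuel) :
    PySem.Chars.splitOn.go [' '] fuel l cur acc =
      acc.reverse ++ (match pvSp l with
        | t :: ts => (cur.reverse ++ t) :: ts
        | [] => []) := by
  induction fuel generalizing l cur acc with
  | zero => omega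
  | succ fuel ih =>
    cases l with
    | nil => simp [PySem.Chars.splitOn.go, pvSp]
    | cons c rest =>
      by_cases hc : c = ' '
      · subst hc
        have hstep : PySem.Chars.splitOn.go [' '] (fuel + 1) (' ' :: rest) cur acc =
            PySem.Chars.splitOn.go [' '] fuel rest [] (cur.reverse :: acc) := by
          simp [PySem.Chars.splitOn.go, List.isPrefixOf]
        rw [hstep, ih rest [] (cur.reverse :: acc) (by simp at h; omega)]
        rcases hspl : pvSp rest with _ | ⟨t0, ts⟩
        · exact absurd hspl (pvSp_ne_nil rest)
        · simp [pvSp, hspl]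
      · have hc' : ¬ (' ' = c) := fun h' => hc h'.symm
        have hstep : PySem.Chars.splitOn.go [' '] (fuel + 1) (c :: rest) cur acc =
            PySem.Chars.splitOn.go [' '] fuel rest (c :: cur) acc := by
          simp [PySem.Chars.splitOn.go, List.isPrefixOf, hc']
        rw [hstep, ih rest (c :: cur) acc (by simp at h; omega)]
        rcases hspl : pvSp rest with _ | ⟨t0, ts⟩
        · exact absurd hspl (pvSp_ne_nil rest)
        · simp [pvSp, hc, hspl]

theorem pvSplitOn_space (cs : List Char) : PySem.Chars.splitOn cs [' '] = pvSp cs := by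
  have h := pvGo_spec (cs.length + 1) cs [] [] (by omega)
  rcases hspl : pvSp cs with _ | ⟨t0, ts⟩
  · exact absurd hspl (pvSp_ne_nil cs)
  · simpa [PySem.Chars.splitOn, hspl] using h

-- join of a nonempty token list, unrolled once
theorem pvJoin_cons (t : List Char) (ts : List (List Char)) (hts : ts ≠ []) :
    PySem.Chars.join [' '] (t :: ts) = t ++ ' ' :: PySem.Chars.join [' '] ts := by
  cases ts with
  | nil => exact absurd rfl hts
  | cons u ts => rw [PySem.Chars.join_cons_cons]; simp

-- the tail of a joined sentence after its first token
def pvTJ : List (List Char) → List Char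
  | [] => []
  | u :: ts => ' ' :: PySem.Chars.join [' '] (u :: ts)

theorem pvJoin_eq_tj (t : List Char) (ts : List (List Char)) :
    PySem.Chars.join [' '] (t :: ts) = t ++ pvTJ ts := by
  cases ts with
  | nil => simp [pvTJ, PySem.Chars.join_singleton]
  | cons u ts => rw [pvJoin_cons t (u :: ts) (by simp)]; rfl

-- joining pvSp gives back the sentence
theorem pvJoin_pvSp (cs : List Char) : PySem.Chars.join [' '] (pvSp cs) = cs := by
  induction cs with
  | nil => simp [pvSp, PySem.Chars.join_singleton]
  | cons c cs ih =>
    simp only [pvSp]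
    by_cases hc : c = ' '
    · subst hc
      rw [if_pos rfl, pvJoin_cons [] (pvSp cs) (pvSp_ne_nil cs), ih]
      simp
    · rw [if_neg hc]
      rcases hspl : pvSp cs with _ | ⟨t0, ts⟩
      · exact absurd hspl (pvSp_ne_nil cs)
      · rw [hspl] at ih
        cases ts with
        | nil =>
          rw [PySem.Chars.join_singleton]
          rw [PySem.Chars.join_singleton] at ih
          simp [ih]
        | cons u ts =>
          rw [pvJoin_cons (c :: t0) (u :: ts) (by simp)]
          rw [pvJoin_cons t0 (u :: ts) (by simp)] at ih
          simp [← ih]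

-- strip a leading marker (A's cur = cur[1:] branch, with slice already reduced to tail)
def pvStrip (t : List Char) : List Char := if pvIsSuffix t then t.tail else t

-- A's per-pair transform
def pvG (sepL : List Char) (cn : List Char × List Char) : List Char :=
  if pvIsSuffix cn.2 then (if pvIsSuffix cn.1 then cn.1.tail else cn.1) ++ sepL
  else (if pvIsSuffix cn.1 then cn.1.tail else cn.1)

-- reference per-sentence result over the token list
def pvA (sepL : List Char) : List (List Char) → List Char
  | [] => []
  | [t] => pvStrip t
  | t :: u :: ts => pvG sepL (t, u) ++ ' ' :: pvA sepL (u :: ts)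

theorem pvSlice_one (t : List Char) : PySem.Chars.slice t (some 1) none = t.tail := by
  have h := PySem.List.slice_from_natCast t 1
  simpa [List.drop_one] using h

-- A's fold–zip–join equals pvA on the token list
theorem pvA_join (sepL : List Char) (t : List Char) (ts : List (List Char)) :
    PySem.Chars.join [' ']
      (((t :: ts).zip ts).map (pvG sepL) ++ [pvStrip (((t :: ts).getLast?).getD [])]) =
      pvA sepL (t :: ts) := by
  induction ts generalizing t with
  | nil => simp [pvA, PySem.Chars.join_singleton]
  | cons u ts ih =>
    have hzip : (t :: u :: ts).zip (u :: ts) = (t, u) :: ((u :: ts).zip ts) := rfl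
    rw [hzip]
    simp only [List.map_cons, List.cons_append, List.getLast?_cons_cons]
    rw [pvJoin_cons _ _ (by simp), ih u]
    simp [pvA]

theorem pvSentA_eq_pvA (sepL : List Char) (cs : List Char) :
    pvSentA sepL cs = pvA sepL (pvSp cs) := by
  unfold pvSentA
  rcases hspl : pvSp cs with _ | ⟨t, ts⟩
  · exact absurd hspl (pvSp_ne_nil cs)
  · simp only [pvSplitOn_space, hspl, PySem.List.pyGet?_neg_one, pvSlice_one, List.tail_cons]
    have hfun : (fun (acc : List (List Char)) (cn : List Char × List Char) =>
        acc ++ [if pvIsSuffix cn.2 = true then (if pvIsSuffix cn.1 = true then cn.1.tail else cn.1) ++ sepL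
                else if pvIsSuffix cn.1 = true then cn.1.tail else cn.1])
        = (fun acc cn => acc ++ [pvG sepL cn]) := rfl
    rw [hfun, PySem.List.foldl_append_singleton_eq_map (pvG sepL)]
    simpa [pvStrip] using pvA_join sepL t ts

-- ===== B-side lemmas =====

theorem pvScanB_nil (sepL : List Char) : pvScanB sepL [] = [] := rfl

theorem pvScanB_three (sepL : List Char) (c d1 d2 : Char) (r : List Char) :
    pvScanB sepL (c :: d1 :: d2 :: r) =
      if c = ' ' ∧ d1 = '+' ∧ d2 ≠ ' ' then sepL ++ ' ' :: pvScanB sepL (d2 :: r)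
      else c :: pvScanB sepL (d1 :: d2 :: r) := rfl

theorem pvScanB_cons_ne (sepL : List Char) (c : Char) (rest : List Char) (hc : c ≠ ' ') :
    pvScanB sepL (c :: rest) = c :: pvScanB sepL rest := by
  cases rest with
  | nil => rfl
  | cons d1 r1 =>
    cases r1 with
    | nil => rfl
    | cons d2 r2 =>
      rw [pvScanB_three, if_neg]
      rintro ⟨h, -⟩; exact hc h

theorem pvScanB_hit (sepL : List Char) (d : Char) (rest : List Char) (hd : d ≠ ' ') :
    pvScanB sepL (' ' :: '+' :: d :: rest) = sepL ++ ' ' :: pvScanB sepL (d :: rest) := by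
  rw [pvScanB_three, if_pos ⟨rfl, rfl, hd⟩]

theorem pvScanB_miss (sepL : List Char) (c d1 d2 : Char) (r : List Char)
    (h : ¬ (c = ' ' ∧ d1 = '+' ∧ d2 ≠ ' ')) :
    pvScanB sepL (c :: d1 :: d2 :: r) = c :: pvScanB sepL (d1 :: d2 :: r) := by
  rw [pvScanB_three, if_neg h]

-- scanning a space-free block copies it (before whatever follows)
theorem pvScanB_append (sepL : List Char) (w rest : List Char) (hw : ∀ c ∈ w, c ≠ ' ') :
    pvScanB sepL (w ++ rest) = w ++ pvScanB sepL rest := by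
  induction w with
  | nil => rfl
  | cons c w ih =>
    rw [List.cons_append, pvScanB_cons_ne sepL c (w ++ rest) (hw c (by simp)),
      ih (fun d hd => hw d (by simp [hd]))]
    rfl

-- one " "-plus-token block of the scan
theorem pvScan_block (sepL : List Char) (t rest : List Char)
    (ht : ∀ c ∈ t, c ≠ ' ') (hrest : rest = [] ∨ ∃ J, rest = ' ' :: J) :
    pvScanB sepL (' ' :: t ++ rest) =
      (if pvIsSuffix t then sepL ++ ' ' :: t.tail else ' ' :: t) ++ pvScanB sepL rest := by
  rcases t with _ | ⟨a, t2⟩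
  · rw [show pvIsSuffix ([] : List Char) = false from rfl]
    rcases hrest with rfl | ⟨J, rfl⟩
    · rfl
    · cases J with
      | nil => rfl
      | cons j J' =>
        rw [show (' ' :: ([] : List Char) ++ ' ' :: j :: J') = ' ' :: ' ' :: j :: J' from rfl,
          pvScanB_miss sepL ' ' ' ' j J' (by rintro ⟨-, h, -⟩; exact absurd h (by decide))]
        rfl
  · by_cases ha : a = '+'
    · subst ha
      rcases t2 with _ | ⟨d, t3⟩
      · rw [show pvIsSuffix ['+'] = false from rfl]
        rcases hrest with rfl | ⟨J, rfl⟩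
        · rfl
        · cases J with
          | nil => rfl
          | cons j J' =>
            rw [show (' ' :: ['+'] ++ ' ' :: j :: J') = ' ' :: '+' :: ' ' :: j :: J' from rfl,
              pvScanB_miss sepL ' ' '+' ' ' (j :: J') (by rintro ⟨-, -, h⟩; exact h rfl),
              pvScanB_cons_ne sepL '+' (' ' :: j :: J') (by decide)]
            rfl
      · have hd : d ≠ ' ' := ht d (by simp)
        have hsuf : pvIsSuffix ('+' :: d :: t3) = true := by
          simp [pvIsSuffix, PySem.Chars.startswith, List.isPrefixOf]
        rw [hsuf]
        rw [show (' ' :: ('+' :: d :: t3) ++ rest) = ' ' :: '+' :: d :: (t3 ++ rest) from by simp]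
        rw [pvScanB_hit sepL d (t3 ++ rest) hd]
        rw [show (d :: (t3 ++ rest)) = (d :: t3) ++ rest from rfl]
        rw [pvScanB_append sepL (d :: t3) rest
          (fun c hc => ht c (by simp at hc ⊢; rcases hc with h | h <;> simp [h]))]
        simp
    · have hsuf : pvIsSuffix (a :: t2) = false := by
        simp [pvIsSuffix, PySem.Chars.startswith, List.isPrefixOf]
        intro h; exact absurd h.symm ha
      rw [hsuf]
      have hstep : pvScanB sepL (' ' :: a :: t2 ++ rest) = ' ' :: pvScanB sepL (a :: t2 ++ rest) := by
        rcases t2 with _ | ⟨b, t3⟩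
        · rcases hrest with rfl | ⟨J, rfl⟩
          · rfl
          · rw [show (' ' :: [a] ++ ' ' :: J) = ' ' :: a :: ' ' :: J from rfl,
              pvScanB_miss sepL ' ' a ' ' J (by rintro ⟨-, h, -⟩; exact ha h)]
            rfl
        · rw [show (' ' :: (a :: b :: t3) ++ rest) = ' ' :: a :: b :: (t3 ++ rest) from by simp,
            pvScanB_miss sepL ' ' a b (t3 ++ rest) (by rintro ⟨-, h, -⟩; exact ha h)]
          rfl
      rw [hstep, pvScanB_append sepL (a :: t2) rest ht]
      simp

-- the scan of strip(first token) ++ rest-of-sentence is pvA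
theorem pvScan_A (sepL : List Char) (ts : List (List Char)) :
    ∀ t, (∀ u ∈ t :: ts, ∀ c ∈ u, c ≠ ' ') →
      pvStrip t ++ pvScanB sepL (pvTJ ts) = pvA sepL (t :: ts) := by
  induction ts with
  | nil => intro t _; simp [pvTJ, pvScanB_nil, pvA]
  | cons u ts ih =>
    intro t hfree
    have hu : ∀ c ∈ u, c ≠ ' ' := hfree u (by simp)
    have htj : pvTJ ts = [] ∨ ∃ J, pvTJ ts = ' ' :: J := by
      cases ts with
      | nil => exact Or.inl rfl
      | cons v ts => exact Or.inr ⟨_, rfl⟩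
    have hjoin : pvTJ (u :: ts) = ' ' :: u ++ pvTJ ts := by
      rw [show pvTJ (u :: ts) = ' ' :: PySem.Chars.join [' '] (u :: ts) from rfl, pvJoin_eq_tj]
      simp
    rw [hjoin, pvScan_block sepL u (pvTJ ts) hu htj]
    have hA : pvA sepL (u :: ts) = pvStrip u ++ pvScanB sepL (pvTJ ts) :=
      (ih u (fun v hv => hfree v (by simp at hv; rcases hv with h | h <;> simp [h]))).symm
    rw [show pvA sepL (t :: u :: ts) = pvG sepL (t, u) ++ ' ' :: pvA sepL (u :: ts) from rfl, hA]
    by_cases hsu : pvIsSuffix u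
    · simp [hsu, pvG, pvStrip]
    · simp [hsu, pvG, pvStrip]

theorem pvSentB_eq_pvA (sepL : List Char) (cs : List Char) :
    pvSentB sepL cs = pvA sepL (pvSp cs) := by
  rcases hspl : pvSp cs with _ | ⟨t, ts⟩
  · exact absurd hspl (pvSp_ne_nil cs)
  · have hfree : ∀ u ∈ t :: ts, ∀ c ∈ u, c ≠ ' ' := by
      rw [← hspl]; exact pvSp_no_space cs
    have hcs : cs = t ++ pvTJ ts := by
      conv_lhs => rw [← pvJoin_pvSp cs, hspl, pvJoin_eq_tj]
    have htfree : ∀ c ∈ t, c ≠ ' ' := hfree t (by simp)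
    have htj : pvTJ ts = [] ∨ ∃ J, pvTJ ts = ' ' :: J := by
      cases ts with
      | nil => exact Or.inl rfl
      | cons v ts => exact Or.inr ⟨_, rfl⟩
    have key := pvScan_A sepL ts t hfree
    subst hcs
    rcases t with _ | ⟨a, t2⟩
    · -- first token empty: the sentence is pvTJ ts, i.e. [] or starts with ' '
      rw [show pvStrip [] = [] from rfl] at key
      rcases htj with h0 | ⟨J, hJ⟩
      · rw [h0] at key ⊢
        exact key
      · rw [hJ] at key ⊢
        cases J with
        | nil => exact key
        | cons j J' =>
          show (if (' ' = '+' ∧ j ≠ ' ') then pvScanB sepL (j :: J')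
                else pvScanB sepL (' ' :: j :: J')) = pvA sepL ([] :: ts)
          rw [if_neg (by rintro ⟨h, -⟩; exact absurd h (by decide))]
          simpa using key
    · by_cases ha : a = '+'
      · subst ha
        rcases t2 with _ | ⟨d, t3⟩
        · -- token ["+"]: not a suffix, B leaves the '+'
          rw [show pvStrip ['+'] = ['+'] from rfl] at key
          rcases htj with h0 | ⟨J, hJ⟩
          · rw [h0] at key ⊢
            exact key
          · rw [hJ] at key ⊢
            show (if ('+' = '+' ∧ ' ' ≠ ' ') then pvScanB sepL (' ' :: J)
                  else pvScanB sepL ('+' :: ' ' :: J)) = pvA sepL (['+'] :: ts)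
            rw [if_neg (by rintro ⟨-, h⟩; exact h rfl)]
            rw [pvScanB_cons_ne sepL '+' (' ' :: J) (by decide)]
            simpa using key
        · -- token '+'::d::t3 with d ≠ ' ': B skips the leading '+'
          have hd : d ≠ ' ' := htfree d (by simp)
          have hsuf : pvIsSuffix ('+' :: d :: t3) = true := by
            simp [pvIsSuffix, PySem.Chars.startswith, List.isPrefixOf]
          rw [show pvStrip ('+' :: d :: t3) = d :: t3 from by simp [pvStrip, hsuf]] at key
          show (if ('+' = '+' ∧ d ≠ ' ') then pvScanB sepL (d :: (t3 ++ pvTJ ts))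
                else pvScanB sepL ('+' :: d :: (t3 ++ pvTJ ts))) = pvA sepL (('+' :: d :: t3) :: ts)
          rw [if_pos ⟨rfl, hd⟩]
          have happ := pvScanB_append sepL (d :: t3) (pvTJ ts)
            (fun c hc => htfree c (by simp at hc ⊢; rcases hc with h | h <;> simp [h]))
          exact happ.trans key
      · -- first char not '+': B scans the sentence unchanged
        have hsuf : pvIsSuffix (a :: t2) = false := by
          simp [pvIsSuffix, PySem.Chars.startswith, List.isPrefixOf]
          intro h; exact absurd h.symm ha
        rw [show pvStrip (a :: t2) = a :: t2 from by simp [pvStrip, hsuf]] at key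
        have happ := pvScanB_append sepL (a :: t2) (pvTJ ts) htfree
        rcases t2 with _ | ⟨b, t3⟩
        · rcases htj with h0 | ⟨J, hJ⟩
          · rw [h0] at key happ ⊢
            exact happ.trans key
          · rw [hJ] at key ⊢
            show (if (a = '+' ∧ ' ' ≠ ' ') then pvScanB sepL (' ' :: J)
                  else pvScanB sepL (a :: ' ' :: J)) = pvA sepL ([a] :: ts)
            rw [if_neg (by rintro ⟨h, -⟩; exact ha h)]
            rw [hJ] at happ
            exact happ.trans key
        · show (if (a = '+' ∧ b ≠ ' ') then pvScanB sepL (b :: (t3 ++ pvTJ ts))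
                else pvScanB sepL (a :: b :: (t3 ++ pvTJ ts))) = pvA sepL ((a :: b :: t3) :: ts)
          rw [if_neg (by rintro ⟨h, -⟩; exact ha h)]
          exact happ.trans key

-- ===== VERDICT (by name: the statement is the Claim_ definition above) =====
theorem convert_lmvr_to_bpe_notation_spec : Claim_equal_convert_lmvr_to_bpe_notation := by
  intro sentences sep _
  unfold Spec_convert_lmvr_to_bpe_notation convert_lmvr_to_bpe_notation convert_lmvr_to_bpe_notation_alt
  refine List.map_congr_left (fun sent _ => ?_)
  rw [pvSentA_eq_pvA, pvSentB_eq_pvA]
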